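-- pv_equiv track=rewrite | github.com/Andreea101018/gdpr-compliant-prompt-sanitizer | bert/generate_gdpr_ner_dataset.py | apply_entity_labels
-- ===== SOURCE A (Python) =====
-- def apply_entity_labels(tokens, entity_tokens, label, labels):
--     n = len(entity_tokens)
--     for i in range(len(tokens) - n + 1):
--         if tokens[i:i+n] == entity_tokens:
--             labels[i] = f"B-{label}"
--             for j in range(1, n):
--                 labels[i+j] = f"I-{label}"
--     return labels
-- ===== SOURCE B (Python) =====
-- def apply_entity_labels(tokens, entity_tokens, label, labels):
--     n = len(entity_tokens)
--     if n == 0: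
--         return labels  # no entity to label
--     # inverted index: token -> list of positions (one pass over tokens)
--     index = {}
--     for i, t in enumerate(tokens):
--         index.setdefault(t, []).append(i)
--     # a start i is a match iff for every k, position i+k carries entity_tokens[k]:
--     # intersect the shifted occurrence sets of each entity token
--     cand = set(range(len(tokens) - n + 1))
--     for k in range(n):
--         cand &= {p - k for p in index.get(entity_tokens[k], [])}
--     block = ["B-" + label] + ["I-" + label] * (n - 1)
--     for i in sorted(cand):
--         labels[i:i+n] = block
--     return labels
-- ===== Notes on version B (the rewrite author's own statement) =====
-- stated objective: alternative
-- what changed: B builds an inverted index (token -> positions) in one pass and computes the match starts as the intersection of the shifted occurrence sets of the entity tokens (looping over the PATTERN with a shrinking candidate set instead of sliding a window over the text and comparing a length-n slice at every position), then splices one precomputed B-/I- block at each sorted start.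
-- outside the precondition, e.g. on apply_entity_labels(['a'], [], 'X', ['O', 'O']): A returns ['B-X', 'B-X'], B returns ['O', 'O']
import Mathlib
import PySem

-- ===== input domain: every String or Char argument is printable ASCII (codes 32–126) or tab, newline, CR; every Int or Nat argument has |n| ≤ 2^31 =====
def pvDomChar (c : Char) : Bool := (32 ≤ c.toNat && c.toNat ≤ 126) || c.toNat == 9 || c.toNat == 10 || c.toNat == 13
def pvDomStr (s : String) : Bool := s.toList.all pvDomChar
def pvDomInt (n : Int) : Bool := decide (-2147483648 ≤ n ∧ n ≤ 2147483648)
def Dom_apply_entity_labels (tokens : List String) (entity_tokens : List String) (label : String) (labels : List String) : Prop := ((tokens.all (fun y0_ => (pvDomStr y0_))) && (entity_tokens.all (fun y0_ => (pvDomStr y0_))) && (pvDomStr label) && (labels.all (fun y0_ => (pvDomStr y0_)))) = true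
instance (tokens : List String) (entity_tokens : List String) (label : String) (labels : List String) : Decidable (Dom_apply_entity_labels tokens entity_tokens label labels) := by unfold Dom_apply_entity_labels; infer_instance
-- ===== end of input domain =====

-- B replaces A's sliding-window scan by an inverted index (token -> positions) plus an
-- intersection of the shifted occurrence sets of the entity tokens (the loop runs over the
-- PATTERN with a shrinking candidate set, not over the text), then splices one precomputed
-- B-/I- block at each sorted match start; equivalence is about the RETURN value (both Pythons
-- also mutate `labels` in place, and agree on that mutation on Pre_-inputs).

-- ===== PORT A =====
def apply_entity_labels (tokens : List String) (entity_tokens : List String) (label : String) (labels : List String) : List String :=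
  -- for i in range(len(tokens) - n + 1): if tokens[i:i+n] == entity_tokens:
  --   labels[i] = f"B-{label}"; for j in range(1, n): labels[i+j] = f"I-{label}"
  (PySem.List.pyRange 0 (PySem.List.len tokens - PySem.List.len entity_tokens + 1)).foldl
    (fun ls i =>
      if PySem.List.slice tokens (some i) (some (i + PySem.List.len entity_tokens)) = entity_tokens then
        (PySem.List.pyRange 1 (PySem.List.len entity_tokens)).foldl
          (fun ls j => PySem.List.pySetD ls (i + j) ("I-" ++ label))
          (PySem.List.pySetD ls i ("B-" ++ label))   -- labels[i] = …, labels[i+j] = …: indices in range under Pre_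
      else ls)
    labels

-- ===== PORT B =====
-- index = {}; for i, t in enumerate(tokens): index.setdefault(t, []).append(i)
def pvIndexOf (tokens : List String) : PySem.Dict String (List Int) :=
  (PySem.List.enumerate tokens).foldl
    (fun d it => d.modify it.2 [] (fun ps => ps ++ [it.1])) PySem.Dict.empty

def apply_entity_labels_alt (tokens : List String) (entity_tokens : List String) (label : String) (labels : List String) : List String :=
  if entity_tokens = [] then labels   -- if n == 0: return labels
  else
    -- cand = set(range(len(tokens) - n + 1)); for k in range(n): cand &= {p - k for p in index.get(entity_tokens[k], [])}
    (PySem.List.sorted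
      ((PySem.List.pyRange 0 (PySem.List.len entity_tokens)).foldl
        (fun c k => PySem.Set.inter c
          (PySem.Set.ofList
            (((pvIndexOf tokens).getD (PySem.List.pyGetD entity_tokens k "") []).map (fun p => p - k))))
        (PySem.Set.ofList (PySem.List.pyRange 0 (PySem.List.len tokens - PySem.List.len entity_tokens + 1))))
      (fun x => x)).foldl   -- for i in sorted(cand): labels[i:i+n] = block
      (fun ls i =>
        -- Python slice assignment at a nonnegative index, exact as clamped take/drop
        PySem.List.slice ls none (some i)
          ++ (("B-" ++ label) :: PySem.List.pyRepeat ["I-" ++ label] (PySem.List.len entity_tokens - 1))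
          ++ PySem.List.slice ls (some (i + PySem.List.len entity_tokens)) none)
      labels

-- ===== PRECONDITION & SPEC =====
-- Pre_ excludes (a) empty entity_tokens — the empty-pattern corner, where marking every position
-- "B-…" (A) and marking nothing (B) are both defensible readings, and where A raises IndexError
-- whenever len(labels) ≤ len(tokens) — and (b) inputs where a matched span reaches past the end
-- of labels, on which A raises IndexError.
def Pre_apply_entity_labels (tokens : List String) (entity_tokens : List String) (label : String) (labels : List String) : Prop :=
  entity_tokens ≠ [] ∧
    ∀ i < tokens.length, (tokens.drop i).take entity_tokens.length = entity_tokens →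
      i + entity_tokens.length ≤ labels.length
instance (tokens : List String) (entity_tokens : List String) (label : String) (labels : List String) : Decidable (Pre_apply_entity_labels tokens entity_tokens label labels) := by unfold Pre_apply_entity_labels; infer_instance

def pvWitness_apply_entity_labels : List String × List String × String × List String :=
  (["the", "EU", "law", "EU"], ["EU"], "ORG", ["O", "O", "O", "O"])

def Spec_apply_entity_labels (tokens : List String) (entity_tokens : List String) (label : String) (labels : List String) (out : List String) : Prop := out = apply_entity_labels_alt tokens entity_tokens label labels
instance (tokens : List String) (entity_tokens : List String) (label : String) (labels : List String) (out : List String) : Decidable (Spec_apply_entity_labels tokens entity_tokens label labels out) := by unfold Spec_apply_entity_labels; infer_instance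

-- ===== CLAIM (what is proved, stated in full; the proofs are below) =====
def Claim_equal_apply_entity_labels : Prop := ∀ (tokens : List String) (entity_tokens : List String) (label : String) (labels : List String), Dom_apply_entity_labels tokens entity_tokens label labels → Pre_apply_entity_labels tokens entity_tokens label labels → Spec_apply_entity_labels tokens entity_tokens label labels (apply_entity_labels tokens entity_tokens label labels)

-- ===== LEMMAS AND PROOFS =====

lemma pvRange_nil {a b : Int} (h : b ≤ a) : PySem.List.pyRange a b = [] := by
  rw [List.eq_nil_iff_forall_not_mem]
  intro x hx
  rw [PySem.List.mem_pyRange_one] at hx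
  omega

lemma pvTakeSet (ls : List String) (s : Nat) (v : String) (h : s < ls.length) :
    (ls.set s v).take (s+1) = ls.take s ++ [v] := by
  rw [List.take_set, List.take_add_one, List.getElem?_eq_getElem h]
  show (List.take s ls ++ [ls[s]]).set s v = _
  rw [List.set_append]
  simp [Nat.min_eq_left (Nat.le_of_lt h)]

lemma pvFoldSet (v : String) : ∀ (m s : Nat) (ls : List String), s + m ≤ ls.length →
    (List.range' s m).foldl (fun a j => a.set j v) ls
      = ls.take s ++ List.replicate m v ++ ls.drop (s + m) := by
  intro m
  induction m with
  | zero => intro s ls h; simp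
  | succ m ih =>
      intro s ls h
      rw [List.range'_succ, List.foldl_cons]
      rw [ih (s+1) (ls.set s v) (by simp; omega)]
      rw [pvTakeSet _ _ _ (by omega), List.drop_set_of_lt (by omega)]
      have h2 : s + 1 + m = s + (m + 1) := by omega
      rw [h2, List.replicate_succ]
      simp

lemma pvWriteA (Bv Iv : String) (ls : List String) (i n : Nat) (h1 : 1 ≤ n) (h : i + n ≤ ls.length) :
    (List.range' (i+1) (n-1)).foldl (fun a j => a.set j Iv) (ls.set i Bv)
      = ls.take i ++ (Bv :: List.replicate (n-1) Iv) ++ ls.drop (i + n) := by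
  rw [pvFoldSet Iv (n-1) (i+1) (ls.set i Bv) (by simp; omega)]
  rw [pvTakeSet _ _ _ (by omega), List.drop_set_of_lt (by omega)]
  have h2 : i + 1 + (n - 1) = i + n := by omega
  rw [h2]
  simp

lemma pvReindex (m i : Nat) (v : String) (x : List String) :
    (List.range' 1 m).foldl (fun a j => a.set (i + j) v) x
      = (List.range' (i+1) m).foldl (fun a j => a.set j v) x := by
  rw [List.range'_eq_map_range, List.range'_eq_map_range, List.foldl_map, List.foldl_map]
  congr 1
  funext a k
  congr 1
  omega

lemma pvMatchLen {tokens et : List String} {k : Nat} (hpos : 0 < et.length)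
    (h : (tokens.drop k).take et.length = et) : k + et.length ≤ tokens.length := by
  have h2 := congrArg List.length h
  rw [List.length_take, List.length_drop] at h2
  omega

lemma pvRange_natCast (a m : Nat) :
    PySem.List.pyRange (a : Int) ((a : Int) + (m : Int)) = (List.range' a m).map (fun (k : Nat) => (k : Int)) := by
  induction m with
  | zero =>
      simp only [Nat.cast_zero, add_zero, List.range'_zero, List.map_nil]
      exact pvRange_nil le_rfl
  | succ m ih =>
      have h : ((a:Int) + ((m:Nat)+1 : Nat)) = ((a:Int) + (m:Nat)) + 1 := by push_cast; ring
      rw [h, PySem.List.pyRange_one_succ_right (by omega), ih, List.range'_concat]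
      simp

lemma pvRange_one_n (n : Nat) (h : 1 ≤ n) :
    PySem.List.pyRange 1 ((n : Nat) : Int) = (List.range' 1 (n-1)).map (fun (k : Nat) => (k : Int)) := by
  have h2 := pvRange_natCast 1 (n-1)
  rw [Nat.cast_one] at h2
  rw [show ((n:Nat):Int) = 1 + ((n-1:Nat):Int) by omega, h2]

lemma pvFolds (Bv Iv : String) (n L0 : Nat) (h1 : 1 ≤ n) :
    ∀ (S : List Nat), (∀ i ∈ S, i + n ≤ L0) → ∀ (ls : List String), ls.length = L0 →
      S.foldl (fun ls i =>
          (List.range' (i+1) (n-1)).foldl (fun a j => a.set j Iv) (ls.set i Bv)) ls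
        = S.foldl (fun ls i =>
          ls.take i ++ (Bv :: List.replicate (n-1) Iv) ++ ls.drop (i + n)) ls := by
  intro S
  induction S with
  | nil => intro _ ls _; rfl
  | cons i S ih =>
      intro hS ls hlen
      have hi : i + n ≤ L0 := hS i (by simp)
      rw [List.foldl_cons, List.foldl_cons]
      rw [pvWriteA Bv Iv ls i n h1 (by omega)]
      apply ih (fun j hj => hS j (by simp [hj]))
      simp
      omega

-- the grouping fold behind pvIndexOf: getD reads off the filtered first components
lemma pvIndexAux (t : String) :
    ∀ (l : List (Int × String)) (d : PySem.Dict String (List Int)),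
      ((l.foldl (fun d it => d.modify it.2 [] (fun ps => ps ++ [it.1])) d).getD t [])
        = d.getD t [] ++ (l.filter (fun it => it.2 == t)).map (·.1) := by
  intro l
  induction l with
  | nil => intro d; simp
  | cons it l ih =>
      intro d
      rw [List.foldl_cons, ih]
      rw [PySem.Dict.getD_modify]
      by_cases h : it.2 = t
      · simp [h]
      · simp [h, Ne.symm h]

lemma pvMemIndex (tokens : List String) (t : String) (p : Int) :
    (p ∈ (pvIndexOf tokens).getD t [])
      ↔ ∃ m : Nat, m < tokens.length ∧ p = (m:Int) ∧ tokens.getD m "" = t := by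
  rw [pvIndexOf, pvIndexAux, PySem.Dict.getD_empty, List.nil_append]
  rw [PySem.List.enumerate_eq_map_pyRange tokens ""]
  rw [List.filter_map, List.map_map]
  simp only [List.mem_map, List.mem_filter, Function.comp, PySem.List.len_eq,
    PySem.List.mem_pyRange_one, beq_iff_eq]
  constructor
  · rintro ⟨j, ⟨⟨h0, hL⟩, ht⟩, rfl⟩
    refine ⟨j.toNat, by omega, by omega, ?_⟩
    have hj : ((j.toNat : Nat) : Int) = j := by omega
    rw [← hj, PySem.List.pyGetD_natCast] at ht
    exact ht
  · rintro ⟨m, hm, rfl, ht⟩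
    exact ⟨(m:Int), ⟨⟨by omega, by omega⟩, by rw [PySem.List.pyGetD_natCast]; exact ht⟩, rfl⟩

lemma pvFoldInterMem (g : Int → List Int) :
    ∀ (l : List Int) (c : List Int) (x : Int),
      x ∈ l.foldl (fun c k => PySem.Set.inter c (PySem.Set.ofList (g k))) c
        ↔ x ∈ c ∧ ∀ k ∈ l, x ∈ g k := by
  intro l
  induction l with
  | nil => intro c x; simp
  | cons k l ih =>
      intro c x
      rw [List.foldl_cons, ih]
      rw [PySem.Set.mem_inter, PySem.Set.mem_ofList]
      constructor
      · rintro ⟨⟨hc, hk⟩, hrest⟩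
        exact ⟨hc, fun k' hk' => by rcases List.mem_cons.mp hk' with rfl | h; exact hk; exact hrest k' h⟩
      · rintro ⟨hc, hall⟩
        exact ⟨⟨hc, hall k (by simp)⟩, fun k' h => hall k' (by simp [h])⟩

lemma pvFoldInterNodup (g : Int → List Int) :
    ∀ (l : List Int) (c : List Int), c.Nodup →
      (l.foldl (fun c k => PySem.Set.inter c (PySem.Set.ofList (g k))) c).Nodup := by
  intro l
  induction l with
  | nil => intro c h; exact h
  | cons k l ih =>
      intro c h
      rw [List.foldl_cons]
      exact ih _ (List.Nodup.filter _ h)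

lemma pvWindow : ∀ (et tokens : List String) (i : Nat), i + et.length ≤ tokens.length →
    ((tokens.drop i).take et.length = et ↔ ∀ k < et.length, tokens.getD (i+k) "" = et.getD k "") := by
  intro et
  induction et with
  | nil => intro tokens i h; simp
  | cons e et ih =>
      intro tokens i h
      have hi : i < tokens.length := by simp at h; omega
      have hdrop : tokens.drop i = tokens[i] :: tokens.drop (i+1) := List.drop_eq_getElem_cons hi
      rw [List.length_cons, hdrop, List.take_succ_cons, List.cons_eq_cons]
      rw [ih tokens (i+1) (by simp at h ⊢; omega)]
      constructor
      · rintro ⟨he, hrest⟩ k hk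
        cases k with
        | zero =>
            rw [Nat.add_zero, List.getD_cons_zero, List.getD_eq_getElem _ _ hi, he]
        | succ k =>
            have := hrest k (by omega)
            rw [List.getD_cons_succ, show i + (k+1) = (i+1) + k by omega]
            exact this
      · intro hall
        refine ⟨?_, fun k hk => ?_⟩
        · have := hall 0 (by omega)
          rw [Nat.add_zero, List.getD_cons_zero, List.getD_eq_getElem _ _ hi] at this
          exact this
        · have := hall (k+1) (by omega)
          rw [List.getD_cons_succ, show i + (k+1) = (i+1) + k by omega] at this
          exact this

-- the computed candidate set, sorted, is exactly the list of window-match starts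
lemma pvStarts (tokens et : List String) (hne : et ≠ []) :
    PySem.List.sorted
      ((PySem.List.pyRange 0 (PySem.List.len et)).foldl
        (fun c k => PySem.Set.inter c
          (PySem.Set.ofList
            (((pvIndexOf tokens).getD (PySem.List.pyGetD et k "") []).map (fun p => p - k))))
        (PySem.Set.ofList (PySem.List.pyRange 0 (PySem.List.len tokens - PySem.List.len et + 1))))
      (fun x => x)
      = ((List.range tokens.length).filter
          (fun i => decide ((tokens.drop i).take et.length = et))).map (fun m : Nat => (m : Int)) := by
  have h1 : 1 ≤ et.length := List.length_pos_of_ne_nil hne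
  set L := tokens.length with hL
  set n := et.length with hn
  set S : List Nat := (List.range L).filter (fun i => decide ((tokens.drop i).take n = et)) with hS
  apply PySem.List.sorted_eq_of_perm_of_pairwise_lt
  · -- (S.map cast).Perm candF
    rw [List.perm_ext_iff_of_nodup
      ((List.Nodup.filter _ (List.nodup_range)).map (fun a b => by exact_mod_cast id))
      (pvFoldInterNodup _ _ _ (PySem.Set.nodup_ofList _))]
    intro x
    rw [pvFoldInterMem (g := fun k => ((pvIndexOf tokens).getD (PySem.List.pyGetD et k "") []).map (fun p => p - k))]
    rw [PySem.Set.mem_ofList, PySem.List.mem_pyRange_one]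
    simp only [PySem.List.len_eq, ← hL, ← hn, List.mem_map, List.mem_filter, List.mem_range,
      PySem.List.mem_pyRange_one, decide_eq_true_eq]
    constructor
    · rintro ⟨i, ⟨hiL, hwin⟩, rfl⟩
      have hfit : i + n ≤ L := pvMatchLen (by omega) hwin
      have hget := (pvWindow et tokens i (by omega)).mp hwin
      refine ⟨⟨by omega, by omega⟩, ?_⟩
      rintro k ⟨hk0, hkn⟩
      have hk' : k = ((k.toNat : Nat) : Int) := by omega
      refine ⟨(i : Int) + k, ?_, by ring⟩
      rw [hk', PySem.List.pyGetD_natCast, pvMemIndex]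
      exact ⟨i + k.toNat, by omega, by push_cast; ring, hget k.toNat (by omega)⟩
    · rintro ⟨⟨hx0, hxL⟩, hall⟩
      set i := x.toNat with hi
      have hxi : x = (i : Int) := by omega
      have hfit : i + n ≤ L := by omega
      refine ⟨i, ⟨by omega, ?_⟩, hxi.symm⟩
      rw [pvWindow et tokens i (by omega)]
      intro k hk
      have hkmem := hall (k : Int) ⟨by omega, by omega⟩
      rcases hkmem with ⟨p, hp, hpk⟩
      rw [show (PySem.List.pyGetD et (k:Int) "") = et.getD k "" by rw [PySem.List.pyGetD_natCast]] at hp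
      rw [pvMemIndex] at hp
      rcases hp with ⟨m, hmL, rfl, hmt⟩
      have : m = i + k := by omega
      rw [← this, hmt]
  · -- pairwise <
    rw [List.pairwise_map]
    exact List.Pairwise.imp (fun h => by exact_mod_cast h)
      (List.Pairwise.filter _ List.pairwise_lt_range)

theorem pvMain (tokens : List String) (entity_tokens : List String) (label : String) (labels : List String)
    (hne : entity_tokens ≠ [])
    (hW : ∀ i < tokens.length, (tokens.drop i).take entity_tokens.length = entity_tokens →
      i + entity_tokens.length ≤ labels.length) :
    apply_entity_labels tokens entity_tokens label labels
      = apply_entity_labels_alt tokens entity_tokens label labels := by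
  set n := entity_tokens.length with hn
  have h1 : 1 ≤ n := List.length_pos_of_ne_nil hne
  set L := tokens.length with hL
  set S : List Nat := (List.range L).filter (fun i => decide ((tokens.drop i).take n = entity_tokens)) with hS
  have hSmem : ∀ i ∈ S, (tokens.drop i).take n = entity_tokens ∧ i < L := by
    intro i hi
    rw [hS, List.mem_filter, List.mem_range] at hi
    exact ⟨by simpa using hi.2, hi.1⟩
  -- B-side normalization
  have hB : apply_entity_labels_alt tokens entity_tokens label labels
      = S.foldl (fun ls i =>
          ls.take i ++ (("B-" ++ label) :: List.replicate (n-1) ("I-" ++ label)) ++ ls.drop (i + n)) labels := by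
    rw [apply_entity_labels_alt, if_neg hne, pvStarts tokens entity_tokens hne]
    rw [← hL, ← hn, ← hS, List.foldl_map]
    apply PySem.List.foldl_congr_mem
    intro acc k _
    simp only [PySem.List.len_eq, ← hn]
    rw [show ((k:Int) + (n:Int)) = (((k+n : Nat)):Int) by push_cast; ring]
    rw [PySem.List.slice_to_natCast, PySem.List.slice_from_natCast]
    rw [PySem.List.pyRepeat_singleton]
    rw [show (((n:Nat):Int) - 1).toNat = n - 1 by omega]
  -- A-side normalization
  have hA : apply_entity_labels tokens entity_tokens label labels
      = S.foldl (fun ls i =>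
          (List.range' (i+1) (n-1)).foldl (fun a j => a.set j ("I-" ++ label))
            (ls.set i ("B-" ++ label))) labels := by
    rw [apply_entity_labels]
    simp only [PySem.List.len_eq, ← hn, ← hL]
    by_cases hLn : n ≤ L + 1
    · rw [show (L:Int) - (n:Int) + 1 = ((L + 1 - n : Nat):Int) by omega]
      rw [PySem.List.pyRange_zero_natCast, List.foldl_map]
      rw [PySem.List.foldl_ite_eq_foldl_filter
        (p := fun (y:Nat) => PySem.List.slice tokens (some (y:Int)) (some ((y:Int) + (n:Int))) = entity_tokens)]
      rw [show ((List.range (L+1-n)).filter _) = S from ?_]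
      · apply PySem.List.foldl_congr_mem
        intro acc k _
        rw [pvRange_one_n n h1, List.foldl_map]
        simp only [← Nat.cast_add, PySem.List.pySetD_natCast]
        rw [pvReindex]
      · calc ((List.range (L+1-n)).filter
              (fun (y : Nat) => decide (PySem.List.slice tokens (some (y:Int)) (some ((y:Int) + (n:Int))) = entity_tokens)))
            = ((List.range (L+1-n)).filter (fun i => decide ((tokens.drop i).take n = entity_tokens))) := by
              apply List.filter_congr
              intro k _
              simp only [PySem.List.slice_natCast_add]
          _ = S := by
              rw [hS]
              rw [show List.range L = List.range (L+1-n) ++ List.range' (L+1-n) (L - (L+1-n)) from ?_]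
              · rw [List.filter_append, show (List.range' (L+1-n) (L - (L+1-n))).filter
                    (fun i => decide ((tokens.drop i).take n = entity_tokens)) = [] from ?_]
                · simp
                · rw [List.filter_eq_nil_iff]
                  intro k hk
                  rw [List.mem_range'] at hk
                  simp only [decide_eq_true_eq]
                  intro hmatch
                  have := pvMatchLen (by omega) (hn ▸ hmatch)
                  omega
              · rw [List.range_eq_range', List.range_eq_range']
                have h3 := @List.range'_append 0 (L+1-n) (L - (L+1-n)) 1
                norm_num at h3
                conv_lhs => rw [show L = (L+1-n) + (L - (L+1-n)) by omega]
                exact h3.symm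
    · rw [pvRange_nil (by omega : (L:Int) - (n:Int) + 1 ≤ 0)]
      rw [show S = [] from ?_]
      · rfl
      · rw [hS, List.filter_eq_nil_iff]
        intro k hk
        simp only [decide_eq_true_eq]
        intro hmatch
        have := pvMatchLen (by omega) (hn ▸ hmatch)
        rw [List.mem_range] at hk
        omega
  rw [hA, hB]
  exact pvFolds ("B-" ++ label) ("I-" ++ label) n labels.length h1 S
    (fun i hi => hW i (hSmem i hi).2 (hSmem i hi).1) labels rfl

-- ===== VERDICT (by name: the statement is the Claim_ definition above) =====
theorem apply_entity_labels_spec : Claim_equal_apply_entity_labels := by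
  intro tokens entity_tokens label labels _ hPre
  unfold Pre_apply_entity_labels at hPre
  show apply_entity_labels tokens entity_tokens label labels
      = apply_entity_labels_alt tokens entity_tokens label labels
  exact pvMain tokens entity_tokens label labels hPre.1 hPre.2
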